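-- pv_equiv track=rewrite | github.com/muskan9328-source/75daysLeetCodeChalenge | 3820-pythagorean-distance-nodes-in-a-tree/3820-pythagorean-distance-nodes-in-a-tree.py | specialNodes
-- ===== SOURCE A (Python) =====
-- from collections import deque
--
-- def specialNodes(n, edges, x, y, z):   # 👈 yaha change kiya
--     graph = [[] for _ in range(n)]
--     for u, v in edges:
--         graph[u].append(v)
--         graph[v].append(u)
--
--     def bfs(start):
--         dist = [-1] * n
--         queue = deque([start])
--         dist[start] = 0
--
--         while queue:
--             node = queue.popleft()
--             for nei in graph[node]:
--                 if dist[nei] == -1: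
--                     dist[nei] = dist[node] + 1
--                     queue.append(nei)
--         return dist
--
--     dx = bfs(x)
--     dy = bfs(y)
--     dz = bfs(z)
--
--     count = 0
--     for i in range(n):
--         a, b, c = sorted([dx[i], dy[i], dz[i]])
--         if a*a + b*b == c*c:
--             count += 1
--
--     return count
-- ===== SOURCE B (Python) =====
-- def specialNodes(n, edges, x, y, z):
--     # Bellman-Ford-style synchronous relaxation over the raw edge list:
--     # no adjacency list and no queue; round d marks every still-unseen node
--     # adjacent to a node at distance d-1.
--     def dists(src):
--         dist = [-1] * n
--         dist[src] = 0
--         for d in range(1, n):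
--             for u, v in edges:
--                 if dist[u] == d - 1 and dist[v] == -1:
--                     dist[v] = d
--                 if dist[v] == d - 1 and dist[u] == -1:
--                     dist[u] = d
--         return dist
--
--     dx, dy, dz = dists(x), dists(y), dists(z)
--     count = 0
--     for i in range(n):
--         a, b, c = sorted([dx[i], dy[i], dz[i]])
--         if a * a + b * b == c * c:
--             count += 1
--     return count
-- ===== Notes on version B (the rewrite author's own statement) =====
-- stated objective: alternative
-- what changed: B computes the three distance arrays by Bellman-Ford-style synchronous relaxation rounds over the raw edge list (round d marks every unseen node adjacent to a node at distance d-1), with no adjacency list and no BFS queue; only the final sorted-triple Pythagorean counting loop is kept.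
import Mathlib
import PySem

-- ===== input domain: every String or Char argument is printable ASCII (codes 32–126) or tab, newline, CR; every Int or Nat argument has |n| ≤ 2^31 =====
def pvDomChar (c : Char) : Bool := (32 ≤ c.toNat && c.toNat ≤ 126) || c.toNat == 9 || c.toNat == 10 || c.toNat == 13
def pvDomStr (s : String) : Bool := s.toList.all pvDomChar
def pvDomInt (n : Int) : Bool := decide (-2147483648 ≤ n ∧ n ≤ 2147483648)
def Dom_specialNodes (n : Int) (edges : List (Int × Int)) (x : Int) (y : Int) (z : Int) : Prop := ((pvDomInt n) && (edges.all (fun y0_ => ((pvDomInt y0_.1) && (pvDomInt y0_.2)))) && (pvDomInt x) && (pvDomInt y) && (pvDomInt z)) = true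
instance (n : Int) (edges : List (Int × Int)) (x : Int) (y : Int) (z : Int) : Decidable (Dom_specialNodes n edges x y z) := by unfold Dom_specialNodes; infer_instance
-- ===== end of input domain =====

-- B drops A's adjacency list and BFS queue entirely and computes the three distance arrays by
-- Bellman-Ford-style synchronous relaxation rounds over the raw edge list; objective:
-- alternative (a different algorithm of similar size; B is not claimed faster).

-- ===== PORT A =====
-- graph = [[] for _ in range(n)]; for u, v in edges: graph[u].append(v); graph[v].append(u)
def pvGraphStep (g : List (List Int)) (e : Int × Int) : List (List Int) :=
  let g1 := PySem.List.pySetD g e.1 (PySem.List.pyGetD g e.1 [] ++ [e.2])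
  PySem.List.pySetD g1 e.2 (PySem.List.pyGetD g1 e.2 [] ++ [e.1])

def pvBuildGraph (n : Int) (edges : List (Int × Int)) : List (List Int) :=
  edges.foldl pvGraphStep ((PySem.List.pyRange 0 n 1).map (fun _ => ([] : List Int)))

-- body of A's while-loop for one popped node: 'for nei in graph[node]: if dist[nei] == -1: …'
def pvNodeA (g : List (List Int)) (s : List Int × List Int) (node : Int) : List Int × List Int :=
  (PySem.List.pyGetD g node []).foldl
    (fun s nei =>
      if PySem.List.pyGetD s.1 nei 0 = -1 then
        (PySem.List.pySetD s.1 nei (PySem.List.pyGetD s.1 node 0 + 1), s.2 ++ [nei])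
      else s) s

-- 'while queue: node = queue.popleft(); …' — fuel n+1 bounds the number of pops (every
-- enqueue after the first marks a cell that was -1), so on Pre_ the loop is run to completion
def pvRunA (g : List (List Int)) : Nat → List Int → List Int → List Int
  | _, dist, [] => dist
  | 0, dist, _ :: _ => dist
  | fuel+1, dist, node :: rest =>
    let s := pvNodeA g (dist, rest) node
    pvRunA g fuel s.1 s.2

-- def bfs(start): dist = [-1]*n; dist[start] = 0; queue = deque([start]); while queue: …
def pvBfsA (g : List (List Int)) (n : Int) (start : Int) : List Int :=
  pvRunA g (n.toNat + 1) (PySem.List.pySetD (List.replicate n.toNat (-1)) start 0) [start]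

-- count = 0; for i in range(n): a,b,c = sorted([dx[i],dy[i],dz[i]]); if a*a+b*b==c*c: count += 1
def pvCountA (n : Int) (dx dy dz : List Int) : Int :=
  (PySem.List.pyRange 0 n 1).foldl (fun count i =>
    match PySem.List.sorted [PySem.List.pyGetD dx i 0, PySem.List.pyGetD dy i 0,
                             PySem.List.pyGetD dz i 0] (fun v => v) false with
    | [a, b, c] => if a * a + b * b = c * c then count + 1 else count
    | _ => count) 0

def specialNodes (n : Int) (edges : List (Int × Int)) (x : Int) (y : Int) (z : Int) : Int :=
  pvCountA n (pvBfsA (pvBuildGraph n edges) n x) (pvBfsA (pvBuildGraph n edges) n y)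
    (pvBfsA (pvBuildGraph n edges) n z)

-- ===== PORT B =====
-- second 'if' of B's inner loop: if dist[v] == d-1 and dist[u] == -1: dist[u] = d
def pvRelaxEdge2 (d : Int) (dist : List Int) (e : Int × Int) : List Int :=
  if PySem.List.pyGetD dist e.2 0 = d - 1 ∧ PySem.List.pyGetD dist e.1 0 = -1 then
    PySem.List.pySetD dist e.1 d
  else dist

-- first 'if' (if dist[u] == d-1 and dist[v] == -1: dist[v] = d), then the second on the result
def pvRelaxEdge (d : Int) (dist : List Int) (e : Int × Int) : List Int :=
  pvRelaxEdge2 d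
    (if PySem.List.pyGetD dist e.1 0 = d - 1 ∧ PySem.List.pyGetD dist e.2 0 = -1 then
       PySem.List.pySetD dist e.2 d
     else dist) e

-- 'for u, v in edges: …' — one relaxation round at distance d
def pvRelaxRound (edges : List (Int × Int)) (dist : List Int) (d : Int) : List Int :=
  edges.foldl (pvRelaxEdge d) dist

-- def dists(src): dist = [-1]*n; dist[src] = 0; for d in range(1, n): … ; return dist
def pvDists (n : Int) (edges : List (Int × Int)) (src : Int) : List Int :=
  (PySem.List.pyRange 1 n 1).foldl (pvRelaxRound edges)
    (PySem.List.pySetD (List.replicate n.toNat (-1)) src 0)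

-- count = 0; for i in range(n): a,b,c = sorted([dx[i],dy[i],dz[i]]); if a*a+b*b==c*c: count += 1
def pvCountB (n : Int) (dx dy dz : List Int) : Int :=
  (PySem.List.pyRange 0 n 1).foldl (fun count i =>
    match PySem.List.sorted [PySem.List.pyGetD dx i 0, PySem.List.pyGetD dy i 0,
                             PySem.List.pyGetD dz i 0] (fun v => v) false with
    | [a, b, c] => if a * a + b * b = c * c then count + 1 else count
    | _ => count) 0

def specialNodes_alt (n : Int) (edges : List (Int × Int)) (x : Int) (y : Int) (z : Int) : Int :=
  pvCountB n (pvDists n edges x) (pvDists n edges y) (pvDists n edges z)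

-- ===== PRECONDITION & SPEC =====
-- Pre_ is exactly the natural domain on which Python A returns: every node label (x, y, z and
-- both endpoints of every edge) indexes a list of length n, i.e. lies in [-n, n); outside it
-- A raises IndexError (n ≥ 1 is implied by -n ≤ x < n).
def Pre_specialNodes (n : Int) (edges : List (Int × Int)) (x : Int) (y : Int) (z : Int) : Prop :=
  (-n ≤ x ∧ x < n) ∧ (-n ≤ y ∧ y < n) ∧ (-n ≤ z ∧ z < n) ∧
  ∀ e ∈ edges, (-n ≤ e.1 ∧ e.1 < n) ∧ (-n ≤ e.2 ∧ e.2 < n)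
instance (n : Int) (edges : List (Int × Int)) (x : Int) (y : Int) (z : Int) : Decidable (Pre_specialNodes n edges x y z) := by unfold Pre_specialNodes; infer_instance

def pvWitness_specialNodes : Int × (List (Int × Int)) × Int × Int × Int := (3, [(0, 1), (1, 2)], 0, 1, 2)

def Spec_specialNodes (n : Int) (edges : List (Int × Int)) (x : Int) (y : Int) (z : Int) (out : Int) : Prop := out = specialNodes_alt n edges x y z
instance (n : Int) (edges : List (Int × Int)) (x : Int) (y : Int) (z : Int) (out : Int) : Decidable (Spec_specialNodes n edges x y z out) := by unfold Spec_specialNodes; infer_instance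

-- ===== CLAIM (what is proved, stated in full; the proofs are below) =====
def Claim_equal_specialNodes : Prop := ∀ (n : Int) (edges : List (Int × Int)) (x : Int) (y : Int) (z : Int), Dom_specialNodes n edges x y z → Pre_specialNodes n edges x y z → Spec_specialNodes n edges x y z (specialNodes n edges x y z)

-- ===== LEMMAS AND PROOFS =====

-- proof-side intermediate: a level-synchronous frontier sweep over A's adjacency list; the
-- proof goes deque-BFS = frontier sweep = relaxation rounds
def pvStepB (w : Int) (s : List Int × List Int) (v : Int) : List Int × List Int :=
  if PySem.List.pyGetD s.1 v 0 = -1 then (PySem.List.pySetD s.1 v w, s.2 ++ [v]) else s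

def pvRoundB (g : List (List Int)) (w : Int) (s : List Int × List Int) (u : Int) : List Int × List Int :=
  (PySem.List.pyGetD g u []).foldl (pvStepB w) s

def pvRunB (g : List (List Int)) : Nat → List Int → Int → List Int → List Int
  | _, dist, _, [] => dist
  | 0, dist, _, _ :: _ => dist
  | fuel+1, dist, d, frontier =>
    let s := frontier.foldl (pvRoundB g (d+1)) (dist, [])
    pvRunB g fuel s.1 (d+1) s.2

def pvLevels (g : List (List Int)) (n : Int) (start : Int) : List Int :=
  pvRunB g (n.toNat + 1) (PySem.List.pySetD (List.replicate n.toNat (-1)) start 0) 0 [start]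

-- the set of cells (valid indices) hit by a list of labels
def pvImg (len : Nat) (l : List Int) (j : Nat) : Bool :=
  l.any (fun v => decide (PySem.List.pyIdx? len v = some j))

-- cell j is touched by round d: some edge joins it to a label at value d-1
def pvTouch (len : Nat) (es : List (Int × Int)) (dist : List Int) (d : Int) (j : Nat) : Bool :=
  es.any (fun p => decide ((PySem.List.pyIdx? len p.2 = some j ∧ PySem.List.pyGetD dist p.1 0 = d - 1) ∨
            (PySem.List.pyIdx? len p.1 = some j ∧ PySem.List.pyGetD dist p.2 0 = d - 1)))

theorem pvImg_iff (len : Nat) (l : List Int) (j : Nat) :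
    pvImg len l j ↔ ∃ v ∈ l, PySem.List.pyIdx? len v = some j := by
  simp [pvImg]

theorem pvTouch_iff (len : Nat) (es : List (Int × Int)) (dist : List Int) (d : Int) (j : Nat) :
    pvTouch len es dist d j ↔
      ∃ p ∈ es, (PySem.List.pyIdx? len p.2 = some j ∧ PySem.List.pyGetD dist p.1 0 = d - 1) ∨
                (PySem.List.pyIdx? len p.1 = some j ∧ PySem.List.pyGetD dist p.2 0 = d - 1) := by
  simp [pvTouch]

theorem pv_pyIdx_lt {len : Nat} {i : Int} {k : Nat} (h : PySem.List.pyIdx? len i = some k) :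
    k < len := by
  unfold PySem.List.pyIdx? at h
  split_ifs at h <;> simp_all <;> omega

theorem pv_pyIdx_some {len : Nat} {i : Int} (h1 : -(len : Int) ≤ i) (h2 : i < len) :
    ∃ k, PySem.List.pyIdx? len i = some k := by
  unfold PySem.List.pyIdx?
  split_ifs <;> exact ⟨_, rfl⟩

theorem pv_getD_of_pyIdx {α : Type} {xs : List α} {i : Int} {k : Nat}
    (h : PySem.List.pyIdx? xs.length i = some k) (d : α) :
    PySem.List.pyGetD xs i d = xs.getD k d := by
  unfold PySem.List.pyGetD PySem.List.pyGet?
  rw [h, List.getD_eq_getElem?_getD]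
  rfl

theorem pv_getD_none {α : Type} {xs : List α} {i : Int}
    (h : PySem.List.pyIdx? xs.length i = none) (d : α) :
    PySem.List.pyGetD xs i d = d := by
  unfold PySem.List.pyGetD PySem.List.pyGet?
  rw [h]
  rfl

theorem pv_setD_of_pyIdx {α : Type} {xs : List α} {i : Int} {k : Nat}
    (h : PySem.List.pyIdx? xs.length i = some k) (v : α) :
    PySem.List.pySetD xs i v = xs.set k v := by
  unfold PySem.List.pySetD PySem.List.pySet?
  rw [h]
  rfl

theorem pv_setD_none {α : Type} {xs : List α} {i : Int}
    (h : PySem.List.pyIdx? xs.length i = none) (v : α) :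
    PySem.List.pySetD xs i v = xs := by
  unfold PySem.List.pySetD PySem.List.pySet?
  rw [h]
  rfl

theorem pv_getD_set_pyIdx {α : Type} (xs : List α) {k : Nat} (hk : k < xs.length) (v : α)
    (j : Int) (d : α) :
    PySem.List.pyGetD (xs.set k v) j d
      = if PySem.List.pyIdx? xs.length j = some k then v else PySem.List.pyGetD xs j d := by
  unfold PySem.List.pyGetD PySem.List.pyGet?
  rw [List.length_set]
  cases hj : PySem.List.pyIdx? xs.length j with
  | none => simp [hj]
  | some m =>
    have hm := pv_pyIdx_lt hj
    by_cases hkm : k = m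
    · subst hkm
      simp [List.getElem?_set, hk]
    · simp [List.getElem?_set, hkm]
      intro hmk
      exact absurd hmk.symm hkm

theorem pv_getD_set' {α : Type} (xs : List α) {k : Nat} (hk : k < xs.length) (v : α)
    (j : Nat) (d : α) :
    (xs.set k v).getD j d = if k = j then v else xs.getD j d := by
  by_cases hj : j < xs.length
  · rw [List.getD_eq_getElem?_getD, List.getD_eq_getElem?_getD, List.getElem?_set]
    split_ifs with h1
    · simp [hj]
    · rfl
  · have hj' : ¬ j < (xs.set k v).length := by simpa using hj
    rw [List.getD_eq_getElem?_getD, List.getD_eq_getElem?_getD,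
        List.getElem?_eq_none (by omega), List.getElem?_eq_none (by simpa using (by omega : xs.length ≤ j))]
    have : ¬ k = j := by omega
    simp [this]

theorem pv_ext {xs ys : List Int} (hl : xs.length = ys.length)
    (h : ∀ j, j < xs.length → xs.getD j 0 = ys.getD j 0) : xs = ys := by
  apply List.ext_getElem hl
  intro i h1 h2
  have := h i h1
  rwa [List.getD_eq_getElem?_getD, List.getD_eq_getElem?_getD,
       List.getElem?_eq_getElem h1, List.getElem?_eq_getElem h2] at this

theorem pv_flip {xs : List Int} {i : Int} (h : PySem.List.pyGetD xs i 0 = -1) :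
    ∃ k, PySem.List.pyIdx? xs.length i = some k ∧ k < xs.length ∧ xs.getD k 0 = -1 := by
  cases hj : PySem.List.pyIdx? xs.length i with
  | none =>
    exfalso
    unfold PySem.List.pyGetD PySem.List.pyGet? at h
    rw [hj] at h
    simp at h
  | some k =>
    refine ⟨k, rfl, pv_pyIdx_lt hj, ?_⟩
    rw [pv_getD_of_pyIdx hj 0] at h
    exact h

theorem pv_countP_set {xs : List Int} {k : Nat} (hk : k < xs.length)
    (hx : xs.getD k 0 = -1) {v : Int} (hv : v ≠ -1) :
    (xs.set k v).countP (fun a => decide (a = -1)) + 1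
      = xs.countP (fun a => decide (a = -1)) := by
  induction xs generalizing k with
  | nil => simp at hk
  | cons x t ih =>
    cases k with
    | zero =>
      simp [List.getD] at hx
      simp [List.countP_cons, hx, hv]
    | succ k =>
      simp at hk
      simp [List.getD] at hx
      simp only [List.set, List.countP_cons]
      have := ih hk hx
      omega

theorem pv_step_len (w : Int) (as : List Int) :
    ∀ (dist q : List Int), ((as.foldl (pvStepB w) (dist, q)).1).length = dist.length := by
  induction as with
  | nil => intro dist q; rfl
  | cons a as ih =>
    intro dist q
    by_cases hc : PySem.List.pyGetD dist a 0 = -1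
    · simp only [List.foldl_cons, pvStepB, hc, if_pos]
      rw [ih]
      exact PySem.List.length_pySetD dist a w
    · simp only [List.foldl_cons, pvStepB, hc, if_neg, not_false_iff]
      exact ih dist q

theorem pv_inner_props (w : Int) (hw : w ≠ -1) (as : List Int) :
    ∀ (dist q : List Int),
      ∃ e : List Int,
        (as.foldl (pvStepB w) (dist, q)).2 = q ++ e ∧
        ((as.foldl (pvStepB w) (dist, q)).1).countP (fun a => decide (a = -1)) + e.length
          = dist.countP (fun a => decide (a = -1)) ∧
        (∀ t : Int, PySem.List.pyGetD dist t 0 ≠ -1 →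
          PySem.List.pyGetD (as.foldl (pvStepB w) (dist, q)).1 t 0 = PySem.List.pyGetD dist t 0) ∧
        (∀ u ∈ e, PySem.List.pyGetD (as.foldl (pvStepB w) (dist, q)).1 u 0 = w) := by
  induction as with
  | nil =>
    intro dist q
    exact ⟨[], by simp, by simp, fun t _ => rfl, by simp⟩
  | cons a as ih =>
    intro dist q
    by_cases hc : PySem.List.pyGetD dist a 0 = -1
    · obtain ⟨k, hik, hk, hgk⟩ := pv_flip hc
      have hset : PySem.List.pySetD dist a w = dist.set k w := pv_setD_of_pyIdx hik w
      have hstep : pvStepB w (dist, q) a = (dist.set k w, q ++ [a]) := by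
        simp [pvStepB, hc, hset]
      have hread : ∀ (j : Int), PySem.List.pyGetD (dist.set k w) j 0
          = if PySem.List.pyIdx? dist.length j = some k then w else PySem.List.pyGetD dist j 0 :=
        fun j => pv_getD_set_pyIdx dist hk w j 0
      obtain ⟨e, he2, hcnt, hpres, hlab⟩ := ih (dist.set k w) (q ++ [a])
      have hkeep : ∀ t : Int, PySem.List.pyGetD dist t 0 ≠ -1 →
          PySem.List.pyGetD (dist.set k w) t 0 = PySem.List.pyGetD dist t 0 := by
        intro t ht
        rw [hread t]
        split_ifs with hidx
        · exfalso; apply ht; rw [pv_getD_of_pyIdx hidx 0, hgk]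
        · rfl
      refine ⟨a :: e, ?_, ?_, ?_, ?_⟩
      · simp only [List.foldl_cons, hstep]
        rw [he2, List.append_assoc]
        rfl
      · simp only [List.foldl_cons, hstep]
        have hflip := pv_countP_set hk hgk hw
        simp only [List.length_cons]
        omega
      · intro t ht
        simp only [List.foldl_cons, hstep]
        rw [hpres t (by rw [hkeep t ht]; exact ht), hkeep t ht]
      · intro u hu
        simp only [List.foldl_cons, hstep]
        rcases List.mem_cons.mp hu with hu | hu
        · subst hu
          have ha : PySem.List.pyGetD (dist.set k w) u 0 = w := by
            rw [hread u, if_pos hik]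
          rw [hpres u (by rw [ha]; exact hw), ha]
        · exact hlab u hu
    · simp only [List.foldl_cons, pvStepB, hc, if_neg, not_false_iff]
      exact ih dist q

theorem pv_inner_eq (as : List Int) :
    ∀ (dist q : List Int) (node d : Int), 0 ≤ d → PySem.List.pyGetD dist node 0 = d →
      as.foldl (fun s nei =>
          if PySem.List.pyGetD s.1 nei 0 = -1 then
            (PySem.List.pySetD s.1 nei (PySem.List.pyGetD s.1 node 0 + 1), s.2 ++ [nei])
          else s) (dist, q)
        = as.foldl (pvStepB (d + 1)) (dist, q) := by
  induction as with
  | nil => intro dist q node d _ _; rfl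
  | cons a as ih =>
    intro dist q node d hd hnode
    by_cases hc : PySem.List.pyGetD dist a 0 = -1
    · obtain ⟨k, hik, hk, hgk⟩ := pv_flip hc
      have hset : PySem.List.pySetD dist a (d + 1) = dist.set k (d + 1) :=
        pv_setD_of_pyIdx hik (d + 1)
      have hnode' : PySem.List.pyGetD (dist.set k (d + 1)) node 0 = d := by
        rw [pv_getD_set_pyIdx dist hk (d + 1) node 0]
        split_ifs with hidx
        · exfalso
          have := pv_getD_of_pyIdx hidx (0 : Int)
          rw [this, hgk] at hnode
          omega
        · exact hnode
      simp only [List.foldl_cons, pvStepB, hc, if_pos, hnode]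
      rw [ih _ _ node d hd (by rw [hset]; exact hnode')]
    · simp only [List.foldl_cons, pvStepB, hc, if_neg, not_false_iff]
      exact ih dist q node d hd hnode

theorem pv_acc (w : Int) (as : List Int) :
    ∀ (dist q1 q2 : List Int),
      as.foldl (pvStepB w) (dist, q1 ++ q2)
        = ((as.foldl (pvStepB w) (dist, q2)).1, q1 ++ (as.foldl (pvStepB w) (dist, q2)).2) := by
  induction as with
  | nil => intro dist q1 q2; rfl
  | cons a as ih =>
    intro dist q1 q2
    by_cases hc : PySem.List.pyGetD dist a 0 = -1
    · simp only [List.foldl_cons, pvStepB, hc, if_pos]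
      rw [List.append_assoc]
      exact ih _ q1 (q2 ++ [a])
    · simp only [List.foldl_cons, pvStepB, hc, if_neg, not_false_iff]
      exact ih dist q1 q2

theorem pv_acc0 (w : Int) (as : List Int) (dist q : List Int) :
    as.foldl (pvStepB w) (dist, q)
      = ((as.foldl (pvStepB w) (dist, [])).1, q ++ (as.foldl (pvStepB w) (dist, [])).2) := by
  have := pv_acc w as dist q []
  simpa using this

theorem pv_round_flat (g : List (List Int)) (w : Int) (L : List Int) (s : List Int × List Int) :
    L.foldl (pvRoundB g w) s
      = (L.flatMap (fun u => PySem.List.pyGetD g u [])).foldl (pvStepB w) s := by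
  rw [List.foldl_flatMap]
  rfl

theorem pv_roundA (g : List (List Int)) (L : List Int) :
    ∀ (f : Nat) (dist N : List Int) (d : Int), 0 ≤ d →
      (∀ u ∈ L, PySem.List.pyGetD dist u 0 = d) →
      pvRunA g (L.length + f) dist (L ++ N)
        = pvRunA g f (L.foldl (pvRoundB g (d + 1)) (dist, [])).1
            (N ++ (L.foldl (pvRoundB g (d + 1)) (dist, [])).2) := by
  induction L with
  | nil =>
    intro f dist N d _ _
    simp
  | cons u L ih =>
    intro f dist N d hd hL
    have hstep : pvRunA g (L.length + 1 + f) dist (u :: (L ++ N))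
        = pvRunA g (L.length + f) (pvNodeA g (dist, L ++ N) u).1 (pvNodeA g (dist, L ++ N) u).2 := by
      have : L.length + 1 + f = (L.length + f) + 1 := by omega
      rw [this]
      rfl
    have hnode : pvNodeA g (dist, L ++ N) u
        = (PySem.List.pyGetD g u []).foldl (pvStepB (d + 1)) (dist, L ++ N) := by
      unfold pvNodeA
      exact pv_inner_eq _ _ _ u d hd (hL u (List.mem_cons_self))
    set p := (PySem.List.pyGetD g u []).foldl (pvStepB (d + 1)) (dist, []) with hp
    have hnode' : pvNodeA g (dist, L ++ N) u = (p.1, L ++ (N ++ p.2)) := by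
      rw [hnode, pv_acc0]
      rw [← hp, List.append_assoc]
    obtain ⟨e, he2, hcnt, hpres, hlab⟩ :=
      pv_inner_props (d + 1) (by omega) (PySem.List.pyGetD g u []) dist []
    have hL' : ∀ v ∈ L, PySem.List.pyGetD p.1 v 0 = d := by
      intro v hv
      have hvd := hL v (List.mem_cons_of_mem _ hv)
      rw [← hvd]
      exact hpres v (by rw [hvd]; omega)
    have main := ih f p.1 (N ++ p.2) d hd hL'
    calc pvRunA g ((u :: L).length + f) dist ((u :: L) ++ N)
        = pvRunA g (L.length + 1 + f) dist (u :: (L ++ N)) := by simp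
      _ = pvRunA g (L.length + f) p.1 (L ++ (N ++ p.2)) := by rw [hstep, hnode']
      _ = pvRunA g f (L.foldl (pvRoundB g (d+1)) (p.1, [])).1
            ((N ++ p.2) ++ (L.foldl (pvRoundB g (d+1)) (p.1, [])).2) := main
      _ = pvRunA g f ((u :: L).foldl (pvRoundB g (d+1)) (dist, [])).1
            (N ++ ((u :: L).foldl (pvRoundB g (d+1)) (dist, [])).2) := by
          have hcons : (u :: L).foldl (pvRoundB g (d+1)) (dist, [])
              = ((L.foldl (pvRoundB g (d+1)) (p.1, [])).1,
                 p.2 ++ (L.foldl (pvRoundB g (d+1)) (p.1, [])).2) := by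
            rw [List.foldl_cons]
            have : pvRoundB g (d+1) (dist, []) u = p := rfl
            rw [this]
            rw [pv_round_flat, pv_round_flat]
            rw [pv_acc0 (d+1) _ p.1 p.2]
          rw [hcons, List.append_assoc]

theorem pv_run_eq (g : List (List Int)) (c : Nat) :
    ∀ (dist : List Int) (d : Int) (L : List Int) (fA fB : Nat),
      dist.countP (fun a => decide (a = -1)) ≤ c →
      L.length + c ≤ fA → c + 1 ≤ fB → 0 ≤ d →
      (∀ u ∈ L, PySem.List.pyGetD dist u 0 = d) →
      pvRunA g fA dist L = pvRunB g fB dist d L := by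
  induction c using Nat.strong_induction_on with
  | _ c ih =>
    intro dist d L fA fB h1 h2 h3 h4 h5
    cases L with
    | nil =>
      cases fA <;> cases fB <;> rfl
    | cons u L' =>
      set L := u :: L' with hLdef
      set R := L.foldl (pvRoundB g (d+1)) (dist, []) with hR
      obtain ⟨e, he2, hcnt, hpres, hlab⟩ :=
        pv_inner_props (d + 1) (by omega) (L.flatMap (fun u => PySem.List.pyGetD g u [])) dist []
      rw [← pv_round_flat, ← hR] at he2 hcnt hpres hlab
      have hA : pvRunA g fA dist L = pvRunA g (fA - L.length) R.1 R.2 := by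
        have hfa : fA = L.length + (fA - L.length) := by
          simp only [hLdef, List.length_cons] at h2 ⊢
          omega
        calc pvRunA g fA dist L = pvRunA g (L.length + (fA - L.length)) dist (L ++ []) := by
              rw [← hfa, List.append_nil]
          _ = pvRunA g (fA - L.length) R.1 ([] ++ R.2) := by
              exact pv_roundA g L (fA - L.length) dist [] d h4 h5
          _ = pvRunA g (fA - L.length) R.1 R.2 := by rw [List.nil_append]
      have hB : pvRunB g fB dist d L = pvRunB g (fB - 1) R.1 (d + 1) R.2 := by
        have hfb : fB = (fB - 1) + 1 := by omega
        rw [hfb]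
        rfl
      rw [hA, hB]
      have he2' : R.2 = e := by simpa using he2
      cases he : e with
      | nil =>
        rw [he2', he]
        cases (fA - L.length) <;> cases (fB - 1) <;> rfl
      | cons v e' =>
        have hel : 1 ≤ e.length := by rw [he]; simp
        have hec : e.length ≤ c := by omega
        have hLlen : 1 ≤ L.length := by rw [hLdef]; simp
        have h2' : L.length + c ≤ fA := h2
        refine ih (c - e.length) (by omega) R.1 (d + 1) R.2 (fA - L.length) (fB - 1)
          (by omega) ?_ (by omega) (by omega) ?_
        · rw [he2']
          omega
        · intro w hw
          rw [he2'] at hw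
          exact hlab w hw

theorem pv_init_len (n start : Int) :
    (PySem.List.pySetD (List.replicate n.toNat (-1 : Int)) start 0).length = n.toNat := by
  rw [PySem.List.length_pySetD, List.length_replicate]

theorem pv_bfs_eq (g : List (List Int)) (n start : Int)
    (h1 : -n ≤ start) (h2 : start < n) : pvBfsA g n start = pvLevels g n start := by
  unfold pvBfsA pvLevels
  set dist0 := PySem.List.pySetD (List.replicate n.toNat (-1 : Int)) start 0 with hd0
  have hlen0 : dist0.length = n.toNat := pv_init_len n start
  have hn1 : 1 ≤ n := by omega
  obtain ⟨k, hik⟩ := pv_pyIdx_some (len := n.toNat) (i := start) (by omega) (by omega)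
  have hik' : PySem.List.pyIdx? (List.replicate n.toNat (-1 : Int)).length start = some k := by
    rw [List.length_replicate]; exact hik
  have hk : k < n.toNat := pv_pyIdx_lt hik
  have hstart : PySem.List.pyGetD dist0 start 0 = 0 := by
    rw [hd0, pv_setD_of_pyIdx hik' 0,
        pv_getD_set_pyIdx (List.replicate n.toNat (-1 : Int))
          (by rw [List.length_replicate]; exact hk) 0 start 0, if_pos hik']
  apply pv_run_eq g n.toNat
  · calc dist0.countP (fun a => decide (a = -1)) ≤ dist0.length := List.countP_le_length
      _ = n.toNat := hlen0
  · simp only [List.length_cons, List.length_nil]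
    omega
  · omega
  · omega
  · intro u hu
    rcases List.mem_singleton.mp hu with rfl
    exact hstart

-- ---------- frontier sweep ⇒ relaxation rounds ----------

theorem pv_stepchar (w : Int) (hw : w ≠ -1) (as : List Int) :
    ∀ (dist q : List Int),
      (∀ j, j < dist.length → ((as.foldl (pvStepB w) (dist, q)).1).getD j 0 =
        if dist.getD j 0 = -1 ∧ pvImg dist.length as j then w else dist.getD j 0) ∧
      ∃ e, (as.foldl (pvStepB w) (dist, q)).2 = q ++ e ∧
        ∀ j, pvImg dist.length e j ↔ (dist.getD j 0 = -1 ∧ pvImg dist.length as j) := by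
  induction as with
  | nil =>
    intro dist q
    constructor
    · intro j hj
      simp [pvImg]
    · exact ⟨[], by simp, by simp [pvImg]⟩
  | cons a as ih =>
    intro dist q
    simp only [List.foldl_cons]
    by_cases hc : PySem.List.pyGetD dist a 0 = -1
    · obtain ⟨k, hik, hk, hgk⟩ := pv_flip hc
      have hstep : pvStepB w (dist, q) a = (dist.set k w, q ++ [a]) := by
        simp [pvStepB, hc, pv_setD_of_pyIdx hik]
      rw [hstep]
      obtain ⟨hpt, e', he', hE⟩ := ih (dist.set k w) (q ++ [a])
      simp only [List.length_set] at hpt hE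
      have setGet : ∀ j : Nat, (dist.set k w).getD j 0 = if k = j then w else dist.getD j 0 :=
        fun j => pv_getD_set' dist hk w j 0
      have img_cons : ∀ (l : List Int) (j : Nat),
          (pvImg dist.length (a :: l) j = true ↔ (j = k ∨ pvImg dist.length l j = true)) := by
        intro l j
        simp only [pvImg, List.any_cons, Bool.or_eq_true, decide_eq_true_eq, hik,
          Option.some.injEq]
        exact or_congr eq_comm Iff.rfl
      constructor
      · intro j hj
        rw [hpt j hj, setGet j]
        by_cases hjk : k = j
        · subst hjk
          have h1 : pvImg dist.length (a :: as) k = true := by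
            rw [img_cons]; exact Or.inl rfl
          have hL : (if (if k = k then w else dist.getD k 0) = -1 ∧ pvImg dist.length as k = true
              then w else (if k = k then w else dist.getD k 0)) = w := by
            simp only [if_pos rfl]
            split_ifs <;> rfl
          rw [hL, if_pos ⟨hgk, h1⟩]
        · have h2 : (pvImg dist.length (a :: as) j = true) ↔ (pvImg dist.length as j = true) := by
            rw [img_cons]
            have hjk' : ¬ j = k := fun h => hjk h.symm
            tauto
          simp only [if_neg hjk]
          rw [if_congr (and_congr Iff.rfl h2.symm) rfl rfl]
      · refine ⟨a :: e', by rw [he']; simp, ?_⟩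
        intro j
        rw [img_cons, img_cons, hE j, setGet j]
        by_cases hjk : j = k
        · subst hjk
          exact ⟨fun _ => ⟨hgk, Or.inl rfl⟩, fun _ => Or.inl rfl⟩
        · rw [if_neg (show ¬ k = j from fun h => hjk h.symm)]
          tauto
    · have hstep : pvStepB w (dist, q) a = (dist, q) := by simp [pvStepB, hc]
      rw [hstep]
      obtain ⟨hpt, e', he', hE⟩ := ih dist q
      have img_cons : ∀ (l : List Int) (j : Nat), dist.getD j 0 = -1 →
          ((pvImg dist.length (a :: l) j = true) ↔ (pvImg dist.length l j = true)) := by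
        intro l j hj
        cases hia : PySem.List.pyIdx? dist.length a with
        | none =>
          simp only [pvImg, List.any_cons, Bool.or_eq_true, decide_eq_true_eq, hia]
          tauto
        | some k =>
          have hne : dist.getD k 0 ≠ -1 := by
            rw [← pv_getD_of_pyIdx hia 0]; exact hc
          have hjk : ¬ k = j := fun h => hne (h ▸ hj)
          simp only [pvImg, List.any_cons, Bool.or_eq_true, decide_eq_true_eq, hia,
            Option.some.injEq]
          tauto
      constructor
      · intro j hj
        rw [hpt j hj]
        by_cases hj1 : dist.getD j 0 = -1
        · rw [if_congr (and_congr Iff.rfl (img_cons as j hj1).symm) rfl rfl]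
        · rw [if_neg (fun h => hj1 h.1), if_neg (fun h => hj1 h.1)]
      · refine ⟨e', he', ?_⟩
        intro j
        rw [hE j]
        by_cases hj1 : dist.getD j 0 = -1
        · rw [and_congr Iff.rfl (img_cons as j hj1)]
        · constructor
          · intro h; exact absurd h.1 hj1
          · intro h; exact absurd h.1 hj1

theorem pv_relaxEdge_len (d : Int) (dist : List Int) (e : Int × Int) :
    (pvRelaxEdge d dist e).length = dist.length := by
  unfold pvRelaxEdge pvRelaxEdge2
  split_ifs <;> simp [PySem.List.length_pySetD]

theorem pv_relax_fold (d : Int) (hd : 1 ≤ d) :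
    ∀ (es : List (Int × Int)) (dist cur : List Int) (T : Nat → Bool),
      cur.length = dist.length →
      (∀ p ∈ es, (PySem.List.pyIdx? dist.length p.1).isSome ∧
                 (PySem.List.pyIdx? dist.length p.2).isSome) →
      (∀ j, j < dist.length → dist.getD j 0 = -1 ∨
        (0 ≤ dist.getD j 0 ∧ dist.getD j 0 ≤ d - 1)) →
      (∀ j, j < dist.length → cur.getD j 0 =
        if dist.getD j 0 = -1 ∧ T j then d else dist.getD j 0) →
      (es.foldl (pvRelaxEdge d) cur).length = dist.length ∧
      ∀ j, j < dist.length → (es.foldl (pvRelaxEdge d) cur).getD j 0 =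
        if dist.getD j 0 = -1 ∧ (T j ∨ pvTouch dist.length es dist d j) then d
        else dist.getD j 0 := by
  intro es
  induction es with
  | nil =>
    intro dist cur T hlen hin hB hcur
    refine ⟨hlen, ?_⟩
    intro j hj
    rw [List.foldl_nil, hcur j hj]
    have ht : (T j = true ∨ pvTouch dist.length [] dist d j = true) ↔ T j = true := by
      simp [pvTouch]
    rw [if_congr (and_congr Iff.rfl ht.symm) rfl rfl]
  | cons p es ih =>
    intro dist cur T hlen hin hB hcur
    have hp := hin p List.mem_cons_self
    obtain ⟨c1, hc1⟩ := Option.isSome_iff_exists.mp hp.1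
    obtain ⟨c2, hc2⟩ := Option.isSome_iff_exists.mp hp.2
    have hkc1 : c1 < dist.length := pv_pyIdx_lt hc1
    have hkc2 : c2 < dist.length := pv_pyIdx_lt hc2
    have hkc1' : c1 < cur.length := by rw [hlen]; exact hkc1
    have hkc2' : c2 < cur.length := by rw [hlen]; exact hkc2
    have hc1' : PySem.List.pyIdx? cur.length p.1 = some c1 := by rw [hlen]; exact hc1
    have hc2' : PySem.List.pyIdx? cur.length p.2 = some c2 := by rw [hlen]; exact hc2
    have hd1 : PySem.List.pyGetD dist p.1 0 = dist.getD c1 0 := pv_getD_of_pyIdx hc1 0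
    have hd2 : PySem.List.pyGetD dist p.2 0 = dist.getD c2 0 := pv_getD_of_pyIdx hc2 0
    have R1 : ∀ (l : Int) (c : Nat), PySem.List.pyIdx? dist.length l = some c →
        (PySem.List.pyGetD cur l 0 = d - 1 ↔ dist.getD c 0 = d - 1) := by
      intro l c hlc
      have hcl : c < dist.length := pv_pyIdx_lt hlc
      have hlc' : PySem.List.pyIdx? cur.length l = some c := by rw [hlen]; exact hlc
      rw [pv_getD_of_pyIdx hlc' 0, hcur c hcl]
      split_ifs with h
      · obtain ⟨h1, -⟩ := h
        constructor <;> intro hh <;> omega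
      · exact Iff.rfl
    have R2 : ∀ (l : Int) (c : Nat), PySem.List.pyIdx? dist.length l = some c →
        (PySem.List.pyGetD cur l 0 = -1 ↔ (dist.getD c 0 = -1 ∧ ¬ T c = true)) := by
      intro l c hlc
      have hcl : c < dist.length := pv_pyIdx_lt hlc
      have hlc' : PySem.List.pyIdx? cur.length l = some c := by rw [hlen]; exact hlc
      rw [pv_getD_of_pyIdx hlc' 0, hcur c hcl]
      split_ifs with h
      · constructor
        · intro hh; omega
        · intro hh; exact absurd h.2 hh.2
      · constructor
        · intro hh; exact ⟨hh, fun hT => h ⟨hh, hT⟩⟩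
        · intro hh; exact hh.1
    set T' := fun j => T j || decide ((PySem.List.pyIdx? dist.length p.2 = some j ∧
        PySem.List.pyGetD dist p.1 0 = d - 1) ∨ (PySem.List.pyIdx? dist.length p.1 = some j ∧
        PySem.List.pyGetD dist p.2 0 = d - 1)) with hT'
    have hT'iff : ∀ j : Nat, T' j = true ↔ (T j = true ∨
        ((PySem.List.pyIdx? dist.length p.2 = some j ∧ dist.getD c1 0 = d - 1) ∨
         (PySem.List.pyIdx? dist.length p.1 = some j ∧ dist.getD c2 0 = d - 1))) := by
      intro j
      rw [hT']
      simp only [Bool.or_eq_true, decide_eq_true_eq, hd1, hd2]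
    have key : ∀ j, j < dist.length → (pvRelaxEdge d cur p).getD j 0 =
        if dist.getD j 0 = -1 ∧ T' j then d else dist.getD j 0 := by
      by_cases hC1 : (PySem.List.pyGetD cur p.1 0 = d - 1 ∧ PySem.List.pyGetD cur p.2 0 = -1)
      · have hv1 : dist.getD c1 0 = d - 1 := (R1 p.1 c1 hc1).mp hC1.1
        obtain ⟨hv2, hnT2⟩ := (R2 p.2 c2 hc2).mp hC1.2
        have hget : PySem.List.pyGetD (cur.set c2 d) p.2 0 = d := by
          rw [pv_getD_set_pyIdx cur hkc2' d p.2 0, if_pos hc2']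
        have hC2 : ¬ (PySem.List.pyGetD (cur.set c2 d) p.2 0 = d - 1 ∧
                      PySem.List.pyGetD (cur.set c2 d) p.1 0 = -1) := by
          intro h
          rw [hget] at h
          omega
        have hset : pvRelaxEdge d cur p = cur.set c2 d := by
          unfold pvRelaxEdge pvRelaxEdge2
          rw [if_pos hC1, pv_setD_of_pyIdx hc2' d, if_neg hC2]
        intro j hj
        rw [hset, pv_getD_set' cur hkc2' d j 0]
        by_cases hjc : c2 = j
        · subst hjc
          have hTj : T' c2 = true := (hT'iff c2).mpr (Or.inr (Or.inl ⟨hc2, hv1⟩))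
          rw [if_pos rfl, if_pos ⟨hv2, hTj⟩]
        · rw [if_neg hjc, hcur j hj]
          by_cases hdj : dist.getD j 0 = -1
          · have hiff : (T j = true) ↔ (T' j = true) := by
              rw [hT'iff j]
              constructor
              · exact Or.inl
              · rintro (h | h)
                · exact h
                · rcases h with ⟨h1, h2⟩ | ⟨h1, h2⟩
                  · rw [hc2] at h1
                    exact absurd (Option.some.inj h1) hjc
                  · exfalso; omega
            rw [if_congr (and_congr Iff.rfl hiff) rfl rfl]
          · rw [if_neg (fun h => hdj h.1), if_neg (fun h => hdj h.1)]
      · by_cases hC2 : (PySem.List.pyGetD cur p.2 0 = d - 1 ∧ PySem.List.pyGetD cur p.1 0 = -1)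
        · have hv2 : dist.getD c2 0 = d - 1 := (R1 p.2 c2 hc2).mp hC2.1
          obtain ⟨hv1, hnT1⟩ := (R2 p.1 c1 hc1).mp hC2.2
          have hset : pvRelaxEdge d cur p = cur.set c1 d := by
            unfold pvRelaxEdge pvRelaxEdge2
            rw [if_neg hC1, if_pos hC2, pv_setD_of_pyIdx hc1' d]
          intro j hj
          rw [hset, pv_getD_set' cur hkc1' d j 0]
          by_cases hjc : c1 = j
          · subst hjc
            have hTj : T' c1 = true := (hT'iff c1).mpr (Or.inr (Or.inr ⟨hc1, hv2⟩))
            rw [if_pos rfl, if_pos ⟨hv1, hTj⟩]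
          · rw [if_neg hjc, hcur j hj]
            by_cases hdj : dist.getD j 0 = -1
            · have hiff : (T j = true) ↔ (T' j = true) := by
                rw [hT'iff j]
                constructor
                · exact Or.inl
                · rintro (h | h)
                  · exact h
                  · rcases h with ⟨h1, h2⟩ | ⟨h1, h2⟩
                    · exfalso; omega
                    · rw [hc1] at h1
                      exact absurd (Option.some.inj h1) hjc
              rw [if_congr (and_congr Iff.rfl hiff) rfl rfl]
            · rw [if_neg (fun h => hdj h.1), if_neg (fun h => hdj h.1)]
        · have hset : pvRelaxEdge d cur p = cur := by
            unfold pvRelaxEdge pvRelaxEdge2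
            rw [if_neg hC1, if_neg hC2]
          intro j hj
          rw [hset, hcur j hj]
          by_cases hdj : dist.getD j 0 = -1
          · have hiff : (T j = true) ↔ (T' j = true) := by
              rw [hT'iff j]
              constructor
              · exact Or.inl
              · rintro (h | h)
                · exact h
                · rcases h with ⟨h1, h2⟩ | ⟨h1, h2⟩
                  · rw [hc2] at h1
                    have hj2 : j = c2 := (Option.some.inj h1).symm
                    by_cases hT : T j = true
                    · exact hT
                    · exfalso
                      apply hC1
                      refine ⟨(R1 p.1 c1 hc1).mpr h2, (R2 p.2 c2 hc2).mpr ⟨?_, ?_⟩⟩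
                      · rw [← hj2]; exact hdj
                      · rw [← hj2]; exact hT
                  · rw [hc1] at h1
                    have hj1 : j = c1 := (Option.some.inj h1).symm
                    by_cases hT : T j = true
                    · exact hT
                    · exfalso
                      apply hC2
                      refine ⟨(R1 p.2 c2 hc2).mpr h2, (R2 p.1 c1 hc1).mpr ⟨?_, ?_⟩⟩
                      · rw [← hj1]; exact hdj
                      · rw [← hj1]; exact hT
            rw [if_congr (and_congr Iff.rfl hiff) rfl rfl]
          · rw [if_neg (fun h => hdj h.1), if_neg (fun h => hdj h.1)]
    have hlen' : (pvRelaxEdge d cur p).length = dist.length := by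
      rw [pv_relaxEdge_len]; exact hlen
    obtain ⟨hl2, hp2⟩ := ih dist (pvRelaxEdge d cur p) T' hlen'
        (fun q hq => hin q (List.mem_cons_of_mem _ hq)) hB key
    refine ⟨by simpa using hl2, ?_⟩
    intro j hj
    rw [List.foldl_cons, hp2 j hj]
    have hcond : (dist.getD j 0 = -1 ∧ (T' j = true ∨ pvTouch dist.length es dist d j = true)) ↔
        (dist.getD j 0 = -1 ∧ (T j = true ∨ pvTouch dist.length (p :: es) dist d j = true)) := by
      have ht : pvTouch dist.length (p :: es) dist d j = true ↔
          (((PySem.List.pyIdx? dist.length p.2 = some j ∧ PySem.List.pyGetD dist p.1 0 = d - 1) ∨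
            (PySem.List.pyIdx? dist.length p.1 = some j ∧ PySem.List.pyGetD dist p.2 0 = d - 1)) ∨
           pvTouch dist.length es dist d j = true) := by
        simp only [pvTouch, List.any_cons, Bool.or_eq_true, decide_eq_true_eq]
      rw [ht, hT'iff j, hd1, hd2]
      tauto
    rw [if_congr hcond rfl rfl]

theorem pv_graphStep_len (g : List (List Int)) (e : Int × Int) :
    (pvGraphStep g e).length = g.length := by
  unfold pvGraphStep
  simp [PySem.List.length_pySetD]

theorem pv_graph_foldl_len (es : List (Int × Int)) :
    ∀ (g : List (List Int)), (es.foldl pvGraphStep g).length = g.length := by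
  induction es with
  | nil => intro g; rfl
  | cons e es ih =>
    intro g
    rw [List.foldl_cons, ih, pv_graphStep_len]

theorem pv_buildGraph_len (n : Int) (edges : List (Int × Int)) :
    (pvBuildGraph n edges).length = n.toNat := by
  unfold pvBuildGraph
  rw [pv_graph_foldl_len, List.length_map, PySem.List.length_pyRange_one]
  omega

theorem pv_graphStep_mem (g : List (List Int)) (e : Int × Int) (j : Nat) (hj : j < g.length)
    (v : Int) :
    v ∈ (pvGraphStep g e).getD j [] ↔ v ∈ g.getD j [] ∨
      (PySem.List.pyIdx? g.length e.1 = some j ∧ e.2 = v) ∨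
      (PySem.List.pyIdx? g.length e.2 = some j ∧ e.1 = v) := by
  have hstep : pvGraphStep g e = PySem.List.pySetD
      (PySem.List.pySetD g e.1 (PySem.List.pyGetD g e.1 [] ++ [e.2])) e.2
      (PySem.List.pyGetD (PySem.List.pySetD g e.1 (PySem.List.pyGetD g e.1 [] ++ [e.2])) e.2 []
        ++ [e.1]) := rfl
  rw [hstep]
  cases h1 : PySem.List.pyIdx? g.length e.1 with
  | none =>
    rw [pv_setD_none h1]
    cases h2 : PySem.List.pyIdx? g.length e.2 with
    | none =>
      rw [pv_setD_none h2]
      simp [h2]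
    | some c2 =>
      rw [pv_setD_of_pyIdx h2, pv_getD_of_pyIdx h2,
          pv_getD_set' g (pv_pyIdx_lt h2) _ j []]
      by_cases hc : c2 = j
      · subst hc
        simp [h1, List.mem_append, eq_comm]
      · simp [h1, h2, hc]
  | some c1 =>
    have hrow1 : PySem.List.pyGetD g e.1 [] = g.getD c1 [] := pv_getD_of_pyIdx h1 []
    have hset1 : PySem.List.pySetD g e.1 (PySem.List.pyGetD g e.1 [] ++ [e.2])
        = g.set c1 (g.getD c1 [] ++ [e.2]) := by
      rw [hrow1, pv_setD_of_pyIdx h1]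
    rw [hset1]
    have hg1len : (g.set c1 (g.getD c1 [] ++ [e.2])).length = g.length := by simp
    cases h2 : PySem.List.pyIdx? g.length e.2 with
    | none =>
      have h2' : PySem.List.pyIdx? (g.set c1 (g.getD c1 [] ++ [e.2])).length e.2 = none := by
        rw [hg1len]; exact h2
      rw [pv_setD_none h2', pv_getD_set' g (pv_pyIdx_lt h1) _ j []]
      by_cases hc : c1 = j
      · subst hc
        simp [h1, h2, List.mem_append, eq_comm]
      · simp [h1, h2, hc]
    | some c2 =>
      have h2' : PySem.List.pyIdx? (g.set c1 (g.getD c1 [] ++ [e.2])).length e.2 = some c2 := by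
        rw [hg1len]; exact h2
      rw [pv_setD_of_pyIdx h2', pv_getD_of_pyIdx h2',
          pv_getD_set' (g.set c1 (g.getD c1 [] ++ [e.2])) (by rw [hg1len]; exact pv_pyIdx_lt h2) _ j [],
          pv_getD_set' g (pv_pyIdx_lt h1) _ c2 [],
          pv_getD_set' g (pv_pyIdx_lt h1) _ j []]
      by_cases hc2 : c2 = j
      · subst hc2
        by_cases hc1 : c1 = c2
        · subst hc1
          simp [h1, h2, List.mem_append, eq_comm] <;> tauto
        · simp [h1, h2, hc1, List.mem_append, eq_comm] <;> tauto
      · by_cases hc1 : c1 = j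
        · subst hc1
          simp [h1, h2, hc2, List.mem_append, eq_comm] <;> tauto
        · simp [h1, h2, hc1, hc2] <;> tauto

theorem pv_graph_mem (es : List (Int × Int)) :
    ∀ (g : List (List Int)) (j : Nat), j < g.length → ∀ (v : Int),
      (v ∈ (es.foldl pvGraphStep g).getD j [] ↔ v ∈ g.getD j [] ∨
        ∃ p ∈ es, (PySem.List.pyIdx? g.length p.1 = some j ∧ p.2 = v) ∨
                  (PySem.List.pyIdx? g.length p.2 = some j ∧ p.1 = v)) := by
  induction es with
  | nil =>
    intro g j hj v
    simp
  | cons p es ih =>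
    intro g j hj v
    rw [List.foldl_cons]
    have hlen : (pvGraphStep g p).length = g.length := pv_graphStep_len g p
    have hih := ih (pvGraphStep g p) j (by rw [hlen]; exact hj) v
    rw [hlen] at hih
    rw [hih, pv_graphStep_mem g p j hj v]
    simp only [List.exists_mem_cons_iff]
    rw [or_assoc]

theorem pv_buildGraph_mem (n : Int) (edges : List (Int × Int)) (j : Nat) (hj : j < n.toNat)
    (v : Int) :
    v ∈ (pvBuildGraph n edges).getD j [] ↔
      ∃ p ∈ edges, (PySem.List.pyIdx? n.toNat p.1 = some j ∧ p.2 = v) ∨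
                   (PySem.List.pyIdx? n.toNat p.2 = some j ∧ p.1 = v) := by
  unfold pvBuildGraph
  have hblen : ((PySem.List.pyRange 0 n 1).map (fun _ => ([] : List Int))).length = n.toNat := by
    rw [List.length_map, PySem.List.length_pyRange_one]
    omega
  have hbase : ((PySem.List.pyRange 0 n 1).map (fun _ => ([] : List Int))).getD j [] = [] := by
    rw [List.getD_eq_getElem?_getD, List.getElem?_map]
    cases (PySem.List.pyRange 0 n 1)[j]? <;> simp
  have := pv_graph_mem edges ((PySem.List.pyRange 0 n 1).map (fun _ => ([] : List Int))) j
    (by rw [hblen]; exact hj) v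
  rw [hblen, hbase] at this
  rw [this]
  simp

theorem pv_bridge (n : Int) (edges : List (Int × Int)) (dist frontier : List Int) (d : Int)
    (hlen : dist.length = n.toNat)
    (hin : ∀ p ∈ edges, (PySem.List.pyIdx? n.toNat p.1).isSome ∧
                        (PySem.List.pyIdx? n.toNat p.2).isSome)
    (hC : ∀ j, j < n.toNat → (dist.getD j 0 = d - 1 ↔ pvImg n.toNat frontier j)) :
    ∀ j, j < n.toNat →
      (pvImg n.toNat (frontier.flatMap (fun u => PySem.List.pyGetD (pvBuildGraph n edges) u [])) j
        ↔ pvTouch n.toNat edges dist d j) := by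
  intro j hj
  rw [pvImg_iff, pvTouch_iff]
  have hgl : (pvBuildGraph n edges).length = n.toNat := pv_buildGraph_len n edges
  constructor
  · rintro ⟨v, hv, hcv⟩
    obtain ⟨u, hu, hvrow⟩ := List.mem_flatMap.mp hv
    cases hia : PySem.List.pyIdx? n.toNat u with
    | none =>
      rw [pv_getD_none (by rw [hgl]; exact hia) []] at hvrow
      simp at hvrow
    | some c =>
      have hc : c < n.toNat := pv_pyIdx_lt hia
      rw [pv_getD_of_pyIdx (by rw [hgl]; exact hia) []] at hvrow
      obtain ⟨p, hp, hcase⟩ := (pv_buildGraph_mem n edges c hc v).mp hvrow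
      have hdc : dist.getD c 0 = d - 1 :=
        (hC c hc).mpr ((pvImg_iff n.toNat frontier c).mpr ⟨u, hu, hia⟩)
      rcases hcase with ⟨h1, h2⟩ | ⟨h1, h2⟩
      · subst h2
        refine ⟨p, hp, Or.inl ⟨hcv, ?_⟩⟩
        rw [pv_getD_of_pyIdx (show PySem.List.pyIdx? dist.length p.1 = some c by
          rw [hlen]; exact h1) 0]
        exact hdc
      · subst h2
        refine ⟨p, hp, Or.inr ⟨hcv, ?_⟩⟩
        rw [pv_getD_of_pyIdx (show PySem.List.pyIdx? dist.length p.2 = some c by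
          rw [hlen]; exact h1) 0]
        exact hdc
  · rintro ⟨p, hp, hcase⟩
    rcases hcase with ⟨h1, h2⟩ | ⟨h1, h2⟩
    · obtain ⟨c, hc1⟩ := Option.isSome_iff_exists.mp (hin p hp).1
      have hcl : c < n.toNat := pv_pyIdx_lt hc1
      have hdval : dist.getD c 0 = d - 1 := by
        rw [← pv_getD_of_pyIdx (show PySem.List.pyIdx? dist.length p.1 = some c by
          rw [hlen]; exact hc1) 0]
        exact h2
      obtain ⟨u, hu, hcu⟩ := (pvImg_iff n.toNat frontier c).mp ((hC c hcl).mp hdval)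
      refine ⟨p.2, List.mem_flatMap.mpr ⟨u, hu, ?_⟩, h1⟩
      rw [pv_getD_of_pyIdx (show PySem.List.pyIdx? (pvBuildGraph n edges).length u = some c by
        rw [hgl]; exact hcu) []]
      exact (pv_buildGraph_mem n edges c hcl p.2).mpr ⟨p, hp, Or.inl ⟨hc1, rfl⟩⟩
    · obtain ⟨c, hc2⟩ := Option.isSome_iff_exists.mp (hin p hp).2
      have hcl : c < n.toNat := pv_pyIdx_lt hc2
      have hdval : dist.getD c 0 = d - 1 := by
        rw [← pv_getD_of_pyIdx (show PySem.List.pyIdx? dist.length p.2 = some c by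
          rw [hlen]; exact hc2) 0]
        exact h2
      obtain ⟨u, hu, hcu⟩ := (pvImg_iff n.toNat frontier c).mp ((hC c hcl).mp hdval)
      refine ⟨p.1, List.mem_flatMap.mpr ⟨u, hu, ?_⟩, h1⟩
      rw [pv_getD_of_pyIdx (show PySem.List.pyIdx? (pvBuildGraph n edges).length u = some c by
        rw [hgl]; exact hcu) []]
      exact (pv_buildGraph_mem n edges c hcl p.1).mpr ⟨p, hp, Or.inr ⟨hc2, rfl⟩⟩

theorem pv_noop (edges : List (Int × Int)) (n : Int) :
    ∀ (k : Nat) (d : Int) (dist : List Int), 1 ≤ d → (n - d).toNat ≤ k →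
      (∀ p ∈ edges, (PySem.List.pyIdx? dist.length p.1).isSome ∧
                    (PySem.List.pyIdx? dist.length p.2).isSome) →
      (∀ j, j < dist.length → dist.getD j 0 = -1 ∨
        (0 ≤ dist.getD j 0 ∧ dist.getD j 0 ≤ d - 2)) →
      (PySem.List.pyRange d n 1).foldl (pvRelaxRound edges) dist = dist := by
  intro k
  induction k with
  | zero =>
    intro d dist hd hk hin hB
    rw [PySem.List.pyRange_one_eq_nil (by omega), List.foldl_nil]
  | succ k ih =>
    intro d dist hd hk hin hB
    by_cases hnd : n ≤ d
    · rw [PySem.List.pyRange_one_eq_nil hnd, List.foldl_nil]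
    · rw [PySem.List.pyRange_one_cons (by omega), List.foldl_cons]
      have hfold := pv_relax_fold d hd edges dist dist (fun _ => false) rfl hin
        (fun j hj => by
          rcases hB j hj with h | h
          · exact Or.inl h
          · exact Or.inr ⟨h.1, by omega⟩)
        (fun j hj => by simp)
      have hnt : ∀ j, j < dist.length → ¬ (pvTouch dist.length edges dist d j = true) := by
        intro j hj ht
        obtain ⟨p, hp, hcase⟩ := (pvTouch_iff _ _ _ _ _).mp ht
        rcases hcase with ⟨h1, h2⟩ | ⟨h1, h2⟩
        · obtain ⟨c, hc⟩ := Option.isSome_iff_exists.mp (hin p hp).1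
          have := hB c (pv_pyIdx_lt hc)
          rw [pv_getD_of_pyIdx hc 0] at h2
          omega
        · obtain ⟨c, hc⟩ := Option.isSome_iff_exists.mp (hin p hp).2
          have := hB c (pv_pyIdx_lt hc)
          rw [pv_getD_of_pyIdx hc 0] at h2
          omega
      have heq : pvRelaxRound edges dist d = dist := by
        apply pv_ext hfold.1
        intro j hj'
        have hj : j < dist.length := by rw [← hfold.1]; exact hj'
        show (edges.foldl (pvRelaxEdge d) dist).getD j 0 = dist.getD j 0
        rw [hfold.2 j hj, if_neg (fun h => hnt j hj (h.2.resolve_left (by simp)))]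
      rw [heq]
      exact ih (d+1) dist (by omega) (by omega) hin
        (fun j hj => by
          rcases hB j hj with h | h
          · exact Or.inl h
          · exact Or.inr ⟨h.1, by omega⟩)

theorem pv_main (n : Int) (edges : List (Int × Int))
    (hin : ∀ p ∈ edges, (PySem.List.pyIdx? n.toNat p.1).isSome ∧
                        (PySem.List.pyIdx? n.toNat p.2).isSome) :
    ∀ (f : Nat) (d : Int) (dist frontier : List Int),
      1 ≤ d → dist.length = n.toNat →
      (∀ j, j < n.toNat → dist.getD j 0 = -1 ∨
        (0 ≤ dist.getD j 0 ∧ dist.getD j 0 ≤ d - 1)) →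
      (∀ j, j < n.toNat → (dist.getD j 0 = d - 1 ↔ pvImg n.toNat frontier j)) →
      (frontier ≠ [] → dist.countP (fun a => decide (a = -1)) + d.toNat ≤ n.toNat) →
      (n.toNat + 1 ≤ f + d.toNat) →
      pvRunB (pvBuildGraph n edges) f dist (d - 1) frontier
        = (PySem.List.pyRange d n 1).foldl (pvRelaxRound edges) dist := by
  intro f
  induction f with
  | zero =>
    intro d dist frontier hd hlen hB hC hcnt hf
    cases frontier with
    | nil =>
      have hB2 : ∀ j, j < dist.length → dist.getD j 0 = -1 ∨
          (0 ≤ dist.getD j 0 ∧ dist.getD j 0 ≤ d - 2) := by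
        intro j hj
        have hj' : j < n.toNat := by rw [← hlen]; exact hj
        rcases hB j hj' with h | h
        · exact Or.inl h
        · refine Or.inr ⟨h.1, ?_⟩
          have hne : dist.getD j 0 ≠ d - 1 := by
            intro hv
            have him := (hC j hj').mp hv
            simp [pvImg] at him
          omega
      have hnoop := pv_noop edges n (n - d).toNat d dist hd le_rfl
        (fun p hp => by rw [hlen]; exact hin p hp) hB2
      exact hnoop.symm
    | cons u L =>
      exfalso
      have := hcnt (by simp)
      omega
  | succ f ih =>
    intro d dist frontier hd hlen hB hC hcnt hf
    cases frontier with
    | nil =>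
      have hB2 : ∀ j, j < dist.length → dist.getD j 0 = -1 ∨
          (0 ≤ dist.getD j 0 ∧ dist.getD j 0 ≤ d - 2) := by
        intro j hj
        have hj' : j < n.toNat := by rw [← hlen]; exact hj
        rcases hB j hj' with h | h
        · exact Or.inl h
        · refine Or.inr ⟨h.1, ?_⟩
          have hne : dist.getD j 0 ≠ d - 1 := by
            intro hv
            have him := (hC j hj').mp hv
            simp [pvImg] at him
          omega
      have hnoop := pv_noop edges n (n - d).toNat d dist hd le_rfl
        (fun p hp => by rw [hlen]; exact hin p hp) hB2
      exact hnoop.symm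
    | cons u L =>
      have hd1 : d - 1 + 1 = d := by omega
      have hrun : pvRunB (pvBuildGraph n edges) (f+1) dist (d-1) (u::L)
          = pvRunB (pvBuildGraph n edges) f
              ((u::L).foldl (pvRoundB (pvBuildGraph n edges) (d-1+1)) (dist, [])).1 (d-1+1)
              ((u::L).foldl (pvRoundB (pvBuildGraph n edges) (d-1+1)) (dist, [])).2 := rfl
      rw [hrun, hd1, pv_round_flat]
      set FM := (u :: L).flatMap (fun w => PySem.List.pyGetD (pvBuildGraph n edges) w [])
        with hFM
      set S := FM.foldl (pvStepB d) (dist, []) with hS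
      obtain ⟨hpt, e, he, hE⟩ := pv_stepchar d (by omega) FM dist []
      obtain ⟨e2, he2, hcnt2, -, -⟩ := pv_inner_props d (by omega) FM dist []
      rw [← hS] at hpt he he2 hcnt2
      have hee : e2 = e := by
        have h1 : S.2 = e := by rw [he]; simp
        have h2 : S.2 = e2 := by rw [he2]; simp
        rw [← h1, h2]
      rw [hee] at he2 hcnt2
      have hSlen : S.1.length = dist.length := by rw [hS]; exact pv_step_len d FM dist []
      have hS2 : S.2 = e := by rw [he]; simp
      have hbridge := pv_bridge n edges dist (u::L) d hlen hin hC
      by_cases hdn : d < n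
      · rw [PySem.List.pyRange_one_cons hdn, List.foldl_cons]
        have hin' : ∀ p ∈ edges, (PySem.List.pyIdx? dist.length p.1).isSome ∧
            (PySem.List.pyIdx? dist.length p.2).isSome := by
          intro p hp
          rw [hlen]
          exact hin p hp
        have hrelax := pv_relax_fold d hd edges dist dist (fun _ => false) rfl hin'
          (fun j hj => hB j (by rw [← hlen]; exact hj))
          (fun j hj => by simp)
        have hRD : pvRelaxRound edges dist d = S.1 := by
          apply pv_ext (show (pvRelaxRound edges dist d).length = S.1.length by
            show (edges.foldl (pvRelaxEdge d) dist).length = S.1.length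
            rw [hrelax.1, hSlen])
          intro j hj'
          have hj : j < dist.length := by
            have : (pvRelaxRound edges dist d).length = dist.length := hrelax.1
            rw [← this]; exact hj'
          have hjn : j < n.toNat := by rw [← hlen]; exact hj
          show (edges.foldl (pvRelaxEdge d) dist).getD j 0 = S.1.getD j 0
          rw [hrelax.2 j hj, hpt j hj]
          refine if_congr (and_congr Iff.rfl ?_) rfl rfl
          constructor
          · intro h
            have ht : pvTouch dist.length edges dist d j = true := h.resolve_left (by simp)
            rw [hlen] at ht
            have himg := (hbridge j hjn).mpr ht
            rw [hlen]
            exact himg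
          · intro h
            rw [hlen] at h
            have ht := (hbridge j hjn).mp h
            rw [← hlen] at ht
            exact Or.inr ht
        rw [hRD]
        have hd2 : d + 1 - 1 = d := by omega
        have := ih (d+1) S.1 S.2 (by omega) (by rw [hSlen]; exact hlen)
          ?_ ?_ ?_ (by omega)
        · rw [hd2] at this
          rw [hS2] at this ⊢
          exact this
        · intro j hj
          have hj' : j < dist.length := by rw [← hlen] at hj; exact hj
          rw [hpt j hj']
          rcases hB j hj with h | h <;> split_ifs with hc
          · right; constructor <;> omega
          · exact Or.inl h
          · right; constructor <;> omega
          · right; constructor <;> omega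
        · intro j hj
          have hj' : j < dist.length := by rw [← hlen] at hj; exact hj
          have hd2' : d + 1 - 1 = d := by omega
          rw [hd2', hS2]
          constructor
          · intro hv
            by_cases hcond : (dist.getD j 0 = -1 ∧ pvImg dist.length FM j = true)
            · have := (hE j).mpr hcond
              rw [← hlen]
              exact this
            · rw [hpt j hj', if_neg hcond] at hv
              rcases hB j hj with h | h <;> omega
          · intro him
            have him' : pvImg dist.length e j = true := by rw [hlen]; exact him
            have hcond := (hE j).mp him'
            rw [hpt j hj', if_pos hcond]
        · intro hne2
          have he1 : 1 ≤ e.length := by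
            rcases he0 : e with _ | ⟨a, e'⟩
            · rw [he0] at hS2
              exact absurd hS2 hne2
            · simp
          have hc0 := hcnt (by simp)
          omega
      · rw [PySem.List.pyRange_one_eq_nil (by omega), List.foldl_nil]
        have hc0 := hcnt (by simp)
        have hcz : dist.countP (fun a => decide (a = -1)) = 0 := by omega
        have hzero : ∀ j, j < dist.length → dist.getD j 0 ≠ -1 := by
          intro j hj h
          have hmem : dist.getD j 0 ∈ dist := by
            rw [List.getD_eq_getElem?_getD, List.getElem?_eq_getElem hj]
            exact List.getElem_mem hj
          have := List.countP_eq_zero.mp hcz _ hmem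
          apply this
          rw [List.getD_eq_getElem?_getD] at h
          simp [h]
        have hS1 : S.1 = dist := by
          apply pv_ext hSlen
          intro j hj'
          have hj : j < dist.length := by rw [← hSlen]; exact hj'
          rw [hpt j hj, if_neg (fun h => hzero j hj h.1)]
        have hS2nil : S.2 = [] := by
          rw [hS2]
          have : e.length = 0 := by omega
          exact List.length_eq_zero_iff.mp this
        rw [hS1, hS2nil]
        cases f <;> rfl

theorem pv_dists_eq (n : Int) (edges : List (Int × Int)) (start : Int)
    (h1 : -n ≤ start) (h2 : start < n)
    (hpre : ∀ e ∈ edges, (-n ≤ e.1 ∧ e.1 < n) ∧ (-n ≤ e.2 ∧ e.2 < n)) :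
    pvLevels (pvBuildGraph n edges) n start = pvDists n edges start := by
  have hn1 : 1 ≤ n := by omega
  have hin : ∀ p ∈ edges, (PySem.List.pyIdx? n.toNat p.1).isSome ∧
      (PySem.List.pyIdx? n.toNat p.2).isSome := by
    intro p hp
    obtain ⟨⟨ha1, ha2⟩, ⟨hb1, hb2⟩⟩ := hpre p hp
    obtain ⟨k1, hk1⟩ := pv_pyIdx_some (len := n.toNat) (i := p.1) (by omega) (by omega)
    obtain ⟨k2, hk2⟩ := pv_pyIdx_some (len := n.toNat) (i := p.2) (by omega) (by omega)
    exact ⟨by rw [hk1]; rfl, by rw [hk2]; rfl⟩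
  unfold pvLevels pvDists
  set dist0 := PySem.List.pySetD (List.replicate n.toNat (-1 : Int)) start 0 with hd0
  have hlen0 : dist0.length = n.toNat := pv_init_len n start
  obtain ⟨k, hik⟩ := pv_pyIdx_some (len := n.toNat) (i := start) (by omega) (by omega)
  have hik' : PySem.List.pyIdx? (List.replicate n.toNat (-1 : Int)).length start = some k := by
    rw [List.length_replicate]; exact hik
  have hk : k < n.toNat := pv_pyIdx_lt hik
  have hkr : k < (List.replicate n.toNat (-1 : Int)).length := by
    rw [List.length_replicate]; exact hk
  have hset : dist0 = (List.replicate n.toNat (-1 : Int)).set k 0 := pv_setD_of_pyIdx hik' 0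
  have hget0 : ∀ j : Nat, j < n.toNat → dist0.getD j 0 = if k = j then 0 else -1 := by
    intro j hj
    rw [hset, pv_getD_set' _ hkr 0 j 0]
    by_cases hkj : k = j
    · rw [if_pos hkj, if_pos hkj]
    · rw [if_neg hkj, if_neg hkj, List.getD_eq_getElem?_getD, List.getElem?_replicate,
          if_pos hj]
      rfl
  have hrep : ∀ m : Nat, (List.replicate m (-1 : Int)).countP (fun a => decide (a = -1)) = m := by
    intro m
    induction m with
    | zero => rfl
    | succ m ih => simp [List.replicate_succ, List.countP_cons, ih]
  have hcnt0 : dist0.countP (fun a => decide (a = -1)) + 1 = n.toNat := by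
    rw [hset, pv_countP_set hkr (by
      rw [List.getD_eq_getElem?_getD, List.getElem?_replicate, if_pos hk]; rfl) (by omega),
      hrep]
  have hmain := pv_main n edges hin (n.toNat + 1) 1 dist0 [start] le_rfl hlen0
    (fun j hj => by
      rw [hget0 j hj]
      by_cases hkj : k = j
      · rw [if_pos hkj]; right; constructor <;> omega
      · rw [if_neg hkj]; exact Or.inl rfl)
    (fun j hj => by
      rw [hget0 j hj]
      constructor
      · intro hv
        have hkj : k = j := by
          by_cases hkj : k = j
          · exact hkj
          · rw [if_neg hkj] at hv; omega
        rw [pvImg_iff]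
        exact ⟨start, List.mem_singleton.mpr rfl, by rw [hik, hkj]⟩
      · intro him
        obtain ⟨v, hv, hcv⟩ := (pvImg_iff _ _ _).mp him
        rcases List.mem_singleton.mp hv with rfl
        rw [hik] at hcv
        rw [if_pos (Option.some.inj hcv)]
        omega)
    (fun _ => by omega)
    (by omega)
  have h10 : (1 : Int) - 1 = 0 := by norm_num
  rw [h10] at hmain
  exact hmain

-- ===== VERDICT (by name: the statement is the Claim_ definition above) =====
theorem specialNodes_spec : Claim_equal_specialNodes := by
  intro n edges x y z _ hpre
  obtain ⟨hx, hy, hz, he⟩ := hpre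
  unfold Spec_specialNodes specialNodes specialNodes_alt
  rw [pv_bfs_eq _ n x hx.1 hx.2, pv_bfs_eq _ n y hy.1 hy.2, pv_bfs_eq _ n z hz.1 hz.2,
      pv_dists_eq n edges x hx.1 hx.2 he, pv_dists_eq n edges y hy.1 hy.2 he,
      pv_dists_eq n edges z hz.1 hz.2 he]
  unfold pvCountA pvCountB
  rfl
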